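-- pv_equiv track=rewrite | github.com/WanManDu/Backjonn-Algorithm | 16564.py | level_management
-- ===== SOURCE A (Python) =====
-- def level_management(start, end, charLevel, k):
--
--     result = start
--
--     while start <= end:
--         lev = (start + end) // 2
--         levelup = 0
--
--         for l in charLevel:
--             if l < lev:
--                 levelup += lev - l
--
--         if levelup <= k:
--             result = lev
--             start = lev + 1
--         else:
--             end = lev - 1
--
--     return result
-- ===== SOURCE B (Python) =====
-- def level_management(start, end, charLevel, k):
--     # Sort once and build prefix sums; each candidate level's cost is then
--     # evaluated in O(log n) by binary-searching the sorted levels.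
--     ys = sorted(charLevel)
--     pref = [0]
--     s = 0
--     for v in ys:
--         s += v
--         pref.append(s)
--     n = len(ys)
--
--     def count_below(lev):
--         lo, hi = 0, n
--         while lo < hi:
--             mid = (lo + hi) // 2
--             if ys[mid] < lev:
--                 lo = mid + 1
--             else:
--                 hi = mid
--         return lo
--
--     result = start
--     while start <= end:
--         lev = (start + end) // 2
--         j = count_below(lev)
--         if lev * j - pref[j] <= k:
--             result = lev
--             start = lev + 1
--         else:
--             end = lev - 1
--     return result
-- ===== Notes on version B (the rewrite author's own statement) =====
-- stated objective: alternative
-- what changed: Instead of rescanning the whole level list for every binary-search candidate, B sorts the levels once, builds prefix sums, and evaluates each candidate's level-up cost by an inner binary search over the sorted list; it trades a one-off sort/prefix pass for cheaper per-candidate evaluation.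
import Mathlib
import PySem

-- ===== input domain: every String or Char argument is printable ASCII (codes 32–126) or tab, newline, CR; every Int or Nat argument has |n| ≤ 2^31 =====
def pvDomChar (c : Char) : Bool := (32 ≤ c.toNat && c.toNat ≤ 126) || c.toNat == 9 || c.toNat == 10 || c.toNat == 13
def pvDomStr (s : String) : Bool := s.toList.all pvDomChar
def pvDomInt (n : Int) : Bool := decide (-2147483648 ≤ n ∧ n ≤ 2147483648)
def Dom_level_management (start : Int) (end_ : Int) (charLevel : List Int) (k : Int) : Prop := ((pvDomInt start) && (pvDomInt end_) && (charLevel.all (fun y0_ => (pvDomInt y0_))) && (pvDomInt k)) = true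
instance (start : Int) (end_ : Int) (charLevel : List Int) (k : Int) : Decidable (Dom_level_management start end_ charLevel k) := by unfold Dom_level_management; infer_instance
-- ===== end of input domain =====

-- B sorts the level list once and builds prefix sums, so each binary-search
-- candidate's cost is found by an inner binary search instead of a full scan.

-- ===== PORT A =====
-- the while loop of A: state (start, end_, result)
def lmLoopA (charLevel : List Int) (k : Int) (start end_ result : Int) : Int :=
  if _h : start ≤ end_ then
    let lev := PySem.Int.floordiv (start + end_) 2
    let levelup := charLevel.foldl (fun acc l => if l < lev then acc + (lev - l) else acc) 0
    if levelup ≤ k then lmLoopA charLevel k (lev + 1) end_ lev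
    else lmLoopA charLevel k start (lev - 1) result
  else result
termination_by (end_ + 1 - start).toNat
decreasing_by
  · have := PySem.Int.floordiv_two_mid_bounds _h; omega
  · have := PySem.Int.floordiv_two_mid_bounds _h; omega

def level_management (start : Int) (end_ : Int) (charLevel : List Int) (k : Int) : Int :=
  lmLoopA charLevel k start end_ start

-- ===== PORT B =====
-- count_below of Source B: lo, hi are nonnegative Python ints that stay within
-- 0..len(ys), so Nat with Nat division and in-range getD is exact here
def lmCountBelow (ys : List Int) (lev : Int) (lo hi : Nat) : Nat :=
  if lo < hi then
    let mid := (lo + hi) / 2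
    if ys.getD mid 0 < lev then lmCountBelow ys lev (mid + 1) hi
    else lmCountBelow ys lev lo mid
  else lo
termination_by hi - lo
decreasing_by all_goals omega

-- the 'for v in ys' prefix-sum loop of Source B: state (s, pref)
def lmPref (ys : List Int) : List Int :=
  (ys.foldl (fun (sp : Int × List Int) v => (sp.1 + v, sp.2 ++ [sp.1 + v])) (0, [0])).2

-- the while loop of Source B (pref[j] with 0 ≤ j < len(pref): in-range getD is exact)
def lmLoopB (ys pref : List Int) (n : Nat) (k : Int) (start end_ result : Int) : Int :=
  if _h : start ≤ end_ then
    let lev := PySem.Int.floordiv (start + end_) 2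
    let j := lmCountBelow ys lev 0 n
    if lev * (j : Int) - pref.getD j 0 ≤ k then lmLoopB ys pref n k (lev + 1) end_ lev
    else lmLoopB ys pref n k start (lev - 1) result
  else result
termination_by (end_ + 1 - start).toNat
decreasing_by
  · have := PySem.Int.floordiv_two_mid_bounds _h; omega
  · have := PySem.Int.floordiv_two_mid_bounds _h; omega

def level_management_alt (start : Int) (end_ : Int) (charLevel : List Int) (k : Int) : Int :=
  let ys := PySem.List.sorted charLevel (fun x => x) false
  let pref := lmPref ys
  let n := ys.length
  lmLoopB ys pref n k start end_ start

-- ===== PRECONDITION & SPEC =====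
def Spec_level_management (start : Int) (end_ : Int) (charLevel : List Int) (k : Int) (out : Int) : Prop := out = level_management_alt start end_ charLevel k
instance (start : Int) (end_ : Int) (charLevel : List Int) (k : Int) (out : Int) : Decidable (Spec_level_management start end_ charLevel k out) := by unfold Spec_level_management; infer_instance

-- ===== CLAIM (what is proved, stated in full; the proofs are below) =====
def Claim_equal_level_management : Prop := ∀ (start : Int) (end_ : Int) (charLevel : List Int) (k : Int), Dom_level_management start end_ charLevel k → Spec_level_management start end_ charLevel k (level_management start end_ charLevel k)

-- ===== LEMMAS AND PROOFS =====

-- A's inner scan computes lev * count - sum over the elements below lev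
lemma costA_eq (charLevel : List Int) (lev : Int) :
    charLevel.foldl (fun acc l => if l < lev then acc + (lev - l) else acc) 0
      = lev * (charLevel.countP (fun l => decide (l < lev)) : Int)
          - (charLevel.filter (fun l => decide (l < lev))).sum := by
  rw [PySem.List.foldl_ite_eq_foldl_filter (fun l => l < lev) (fun acc l => acc + (lev - l))]
  rw [PySem.List.foldl_add _ (fun l => lev - l)]
  rw [List.countP_eq_length_filter]
  generalize charLevel.filter (fun l => decide (l < lev)) = f
  induction f with
  | nil => simp
  | cons x t ih => simp at *; push_cast [mul_add] at *; omega

-- a sorted list read through getD is monotone on in-range indices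
lemma getD_mono (ys : List Int) (hs : ys.Pairwise (· ≤ ·)) (i j : Nat)
    (hij : i ≤ j) (hj : j < ys.length) : ys.getD i 0 ≤ ys.getD j 0 := by
  rcases eq_or_lt_of_le hij with rfl | h
  · exact le_refl _
  · rw [List.getD_eq_getElem?_getD, List.getD_eq_getElem?_getD]
    simp [Nat.lt_of_le_of_lt hij hj, hj]
    exact (List.pairwise_iff_getElem.mp hs) i j _ hj h

-- invariant of the inner binary search: it lands on the below/not-below boundary
lemma cb_boundary (ys : List Int) (lev : Int) (hs : ys.Pairwise (· ≤ ·)) :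
    ∀ lo hi, lo ≤ hi → hi ≤ ys.length →
    (∀ i, i < lo → ys.getD i 0 < lev) →
    (∀ i, hi ≤ i → i < ys.length → ¬ ys.getD i 0 < lev) →
    (lmCountBelow ys lev lo hi ≤ ys.length ∧
     (∀ i, i < lmCountBelow ys lev lo hi → ys.getD i 0 < lev) ∧
     (∀ i, lmCountBelow ys lev lo hi ≤ i → i < ys.length → ¬ ys.getD i 0 < lev)) := by
  intro lo hi
  induction lo, hi using lmCountBelow.induct ys lev with
  | case1 lo hi h mid hm ih =>
    intro hle hlen hbelow habove
    rw [lmCountBelow, if_pos h, if_pos hm]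
    refine ih (by omega) hlen (fun i hi1 => ?_) habove
    rcases Nat.lt_or_ge i lo with hc | hc
    · exact hbelow i hc
    · exact lt_of_le_of_lt (getD_mono ys hs i ((lo + hi) / 2) (by omega) (by omega)) hm
  | case2 lo hi h mid hm ih =>
    intro hle hlen hbelow habove
    rw [lmCountBelow, if_pos h, if_neg hm]
    refine ih (by omega) (by omega) hbelow (fun i hi1 hi2 hlt => ?_)
    exact hm (lt_of_le_of_lt (getD_mono ys hs ((lo + hi) / 2) i hi1 hi2) hlt)
  | case3 lo hi h =>
    intro hle hlen hbelow habove
    rw [lmCountBelow, if_neg h]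
    exact ⟨hle.trans hlen, hbelow, fun i hi1 hi2 => habove i (by omega) hi2⟩

-- a boundary index is exactly the count of elements below lev
lemma countP_of_boundary (ys : List Int) (lev : Int) (r : Nat) (hr : r ≤ ys.length)
    (hb : ∀ i, i < r → ys.getD i 0 < lev)
    (ha : ∀ i, r ≤ i → i < ys.length → ¬ ys.getD i 0 < lev) :
    ys.countP (fun l => decide (l < lev)) = r := by
  rw [← List.take_append_drop r ys, List.countP_append]
  have h1 : (ys.take r).countP (fun l => decide (l < lev)) = r := by
    rw [List.countP_eq_length_filter, List.filter_eq_self.mpr, List.length_take_of_le hr]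
    intro a hma
    rcases List.mem_iff_getElem.mp hma with ⟨i, hilt, hia⟩
    have hir : i < r := by simp at hilt; omega
    have hil : i < ys.length := by simp at hilt; omega
    have := hb i hir
    rw [List.getD_eq_getElem ys 0 hil] at this
    rw [← hia, List.getElem_take]
    simpa using this
  have h2 : (ys.drop r).countP (fun l => decide (l < lev)) = 0 := by
    rw [List.countP_eq_zero]
    intro a hma
    rcases List.mem_iff_getElem.mp hma with ⟨i, hilt, hia⟩
    have hil : r + i < ys.length := by simp at hilt; omega
    have := ha (r + i) (by omega) hil
    rw [List.getD_eq_getElem ys 0 hil] at this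
    rw [← hia, List.getElem_drop]
    simpa using this
  omega

lemma lmCountBelow_spec (ys : List Int) (lev : Int) (hs : ys.Pairwise (· ≤ ·)) :
    lmCountBelow ys lev 0 ys.length = ys.countP (fun l => decide (l < lev)) := by
  have h := cb_boundary ys lev hs 0 ys.length (Nat.zero_le _) (le_refl _)
    (fun i hi => absurd hi (Nat.not_lt_zero i)) (fun i hi1 hi2 => absurd hi1 (by omega))
  exact (countP_of_boundary ys lev _ h.1 h.2.1 h.2.2).symm

-- the prefix-sum loop appends the running sums
lemma lmPref_fold (ys : List Int) : ∀ (s : Int) (p : List Int),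
    (ys.foldl (fun (sp : Int × List Int) v => (sp.1 + v, sp.2 ++ [sp.1 + v])) (s, p)).2
      = p ++ (List.range ys.length).map (fun i => s + (ys.take (i + 1)).sum) := by
  induction ys with
  | nil => simp
  | cons v t ih =>
    intro s p
    simp only [List.foldl_cons, ih]
    rw [List.length_cons, List.range_succ_eq_map]
    simp [List.map_map, Function.comp_def, List.append_assoc]
    intro a _; ring

-- pref[j] is the sum of the first j sorted elements
lemma lmPref_getD (ys : List Int) (j : Nat) (hj : j ≤ ys.length) :
    (lmPref ys).getD j 0 = (ys.take j).sum := by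
  unfold lmPref
  rw [lmPref_fold]
  cases j with
  | zero => simp
  | succ i =>
    have hi : i < ys.length := by omega
    rw [List.getD_eq_getElem?_getD]
    simp [hi]

-- on a sorted list, the elements below lev are exactly the first countP of them
lemma filter_eq_take_countP (lev : Int) : ∀ (ys : List Int), ys.Pairwise (· ≤ ·) →
    ys.filter (fun l => decide (l < lev)) = ys.take (ys.countP (fun l => decide (l < lev))) := by
  intro ys hs
  induction ys with
  | nil => simp
  | cons y t ih =>
    rcases List.pairwise_cons.mp hs with ⟨hy, ht⟩
    by_cases h : y < lev
    · simp [h, ih ht]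
    · have hall : ∀ x ∈ t, ¬ x < lev := fun x hx hxl => h (lt_of_le_of_lt (hy x hx) hxl)
      have h1 : (y :: t).filter (fun l => decide (l < lev)) = [] := by
        simp [List.filter_eq_nil_iff]
        exact ⟨le_of_not_gt h, fun x hx => le_of_not_gt (hall x hx)⟩
      have h2 : (y :: t).countP (fun l => decide (l < lev)) = 0 := by
        rw [List.countP_eq_length_filter, h1]; rfl
      simp [h1, h2]

-- A's scan equals B's prefix-sum evaluation at the same candidate level
lemma cost_eq (charLevel : List Int) (lev : Int) :
    charLevel.foldl (fun acc l => if l < lev then acc + (lev - l) else acc) 0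
      = lev * ((lmCountBelow (PySem.List.sorted charLevel (fun x => x) false) lev 0
            (PySem.List.sorted charLevel (fun x => x) false).length : Nat) : Int)
          - (lmPref (PySem.List.sorted charLevel (fun x => x) false)).getD
              (lmCountBelow (PySem.List.sorted charLevel (fun x => x) false) lev 0
                (PySem.List.sorted charLevel (fun x => x) false).length) 0 := by
  set ys := PySem.List.sorted charLevel (fun x => x) false with hys
  have hperm : ys.Perm charLevel := PySem.List.sorted_perm charLevel (fun x => x) false
  have hs : ys.Pairwise (· ≤ ·) := by
    have := PySem.List.sorted_pairwise charLevel (fun x => x)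
    simpa using this
  rw [costA_eq, ← hperm.countP_eq, ← (hperm.filter _).sum_eq,
    lmCountBelow_spec ys lev hs, lmPref_getD ys _ List.countP_le_length,
    filter_eq_take_countP lev ys hs]

-- the two while loops agree step for step
lemma loops_eq (charLevel : List Int) (k : Int) : ∀ (n : Nat) (start end_ result : Int),
    (end_ + 1 - start).toNat ≤ n →
    lmLoopA charLevel k start end_ result
      = lmLoopB (PySem.List.sorted charLevel (fun x => x) false)
          (lmPref (PySem.List.sorted charLevel (fun x => x) false))
          (PySem.List.sorted charLevel (fun x => x) false).length k start end_ result := by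
  intro n
  induction n with
  | zero =>
    intro start end_ result hm
    have h : ¬ start ≤ end_ := by omega
    rw [lmLoopA, lmLoopB, dif_neg h, dif_neg h]
  | succ n ih =>
    intro start end_ result hm
    by_cases h : start ≤ end_
    · rw [lmLoopA, lmLoopB, dif_pos h, dif_pos h]
      simp only [← cost_eq charLevel]
      have hmid := PySem.Int.floordiv_two_mid_bounds h
      by_cases hc : charLevel.foldl (fun acc l =>
          if l < PySem.Int.floordiv (start + end_) 2 then
            acc + (PySem.Int.floordiv (start + end_) 2 - l) else acc) 0 ≤ k
      · rw [if_pos hc, if_pos hc]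
        exact ih _ _ _ (by omega)
      · rw [if_neg hc, if_neg hc]
        exact ih _ _ _ (by omega)
    · rw [lmLoopA, lmLoopB, dif_neg h, dif_neg h]

-- ===== VERDICT (by name: the statement is the Claim_ definition above) =====
theorem level_management_spec : Claim_equal_level_management := by
  intro start end_ charLevel k _hd
  unfold Spec_level_management level_management level_management_alt
  exact loops_eq charLevel k _ start end_ start (le_refl _)
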